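-- pv_equiv track=rewrite | github.com/ByteDennis/validate_pipeline | dev/utils/common.py | find_common_mappings
-- ===== SOURCE A (Python) =====
-- from typing import Dict, Any, List, Optional, Union
-- import itertools as it
-- from collections import defaultdict
--
-- def has_prefix_match(a: str, b: str) -> bool:
--     """Check if two strings have prefix relationship."""
--     return a.startswith(b) or b.startswith(a)
--
-- def find_common_mappings(list_a: List[str], list_b: List[str]) -> Dict[str, str]:
--     """Find common mappings between two lists using exact and prefix matching."""
--     result = {}
--     visited = set()
--     prefix_mappings = defaultdict(list)
--
--     # Build prefix mapping candidates
--     for x, y in it.product(list_a, list_b):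
--         if has_prefix_match(x, y):
--             prefix_mappings[x].append(y)
--
--     # Prioritize exact matches
--     for x in list_a:
--         if x in list_b and x not in visited:
--             result[x] = x
--             visited.add(x)
--
--     # Handle prefix matches for remaining items
--     for x in list_a:
--         if x in result:
--             continue
--         for y in prefix_mappings[x]:
--             if y not in visited:
--                 result[x] = y
--                 visited.add(y)
--                 break
--
--     return result
-- ===== SOURCE B (Python) =====
-- def find_common_mappings(list_a, list_b):
--     """Find common mappings between two lists using exact and prefix matching."""
--     # Each distinct key is decided at its first occurrence, so deduplicate up front.
--     order = list(dict.fromkeys(list_a))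
--     in_b = set(list_b)
--     result = {x: x for x in order if x in in_b}
--     # Pool of still-available candidates from list_b, consumed as they are assigned
--     # (instead of a grow-only 'visited' marker set).
--     avail = [y for y in list_b if y not in result]
--     for x in order:
--         if x not in result:
--             for y in avail:
--                 if x.startswith(y) or y.startswith(x):
--                     result[x] = y
--                     avail = [z for z in avail if z != y]
--                     break
--     return result
-- ===== Notes on version B (the rewrite author's own statement) =====
-- stated objective: faster
-- what changed: B deduplicates list_a up front (dict.fromkeys) so each key is decided once, builds the exact matches as a set-intersection dict comprehension, and replaces A's grow-only visited set and precomputed itertools.product prefix table by a consumable pool list of list_b candidates from which each assigned match is deleted.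
import Mathlib
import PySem

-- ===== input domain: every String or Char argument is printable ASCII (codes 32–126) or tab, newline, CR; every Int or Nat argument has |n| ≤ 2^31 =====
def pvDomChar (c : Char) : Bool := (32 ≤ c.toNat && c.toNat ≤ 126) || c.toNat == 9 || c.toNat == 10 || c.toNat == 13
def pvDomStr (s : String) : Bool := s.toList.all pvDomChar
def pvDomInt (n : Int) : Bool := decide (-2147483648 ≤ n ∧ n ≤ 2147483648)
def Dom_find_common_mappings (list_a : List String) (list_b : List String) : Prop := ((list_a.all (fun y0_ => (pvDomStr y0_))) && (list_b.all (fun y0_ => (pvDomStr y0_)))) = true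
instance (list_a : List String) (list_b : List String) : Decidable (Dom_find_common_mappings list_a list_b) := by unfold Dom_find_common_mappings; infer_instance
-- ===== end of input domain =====

-- B deduplicates list_a up front, takes exact matches by a set-intersection comprehension,
-- and consumes matches from a pool list of list_b instead of A's product table + visited set
-- (return value only; both are pure).

-- ===== PORT A =====
def has_prefix_match (a : String) (b : String) : Bool :=
  PySem.Str.startswith a b || PySem.Str.startswith b a

-- 'for y in prefix_mappings[x]: if y not in visited: result[x] = y; visited.add(y); break'
def pvInnerA (x : String) (cands : List String)
    (acc : PySem.Dict String String × PySem.Set String) :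
    PySem.Dict String String × PySem.Set String :=
  match cands with
  | [] => acc
  | y :: ys =>
      if acc.2.contains y then pvInnerA x ys acc
      else (acc.1.insert x y, PySem.Set.add acc.2 y)

def find_common_mappings (list_a : List String) (list_b : List String) : List (String × String) :=
  -- prefix_mappings built over it.product(list_a, list_b)
  let pm : PySem.Dict String (List String) :=
    (list_a.flatMap (fun x => list_b.map (fun y => (x, y)))).foldl
      (fun d p => if has_prefix_match p.1 p.2 then d.modify p.1 [] (· ++ [p.2]) else d)
      PySem.Dict.empty
  -- exact matches
  let s1 : PySem.Dict String String × PySem.Set String :=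
    list_a.foldl
      (fun acc x =>
        if list_b.contains x && !(acc.2.contains x) then
          (acc.1.insert x x, PySem.Set.add acc.2 x)
        else acc)
      (PySem.Dict.empty, PySem.Set.empty)
  -- prefix matches for remaining items
  let s2 : PySem.Dict String String × PySem.Set String :=
    list_a.foldl
      (fun acc x => if acc.1.contains x then acc else pvInnerA x (pm.getD x []) acc)
      s1
  s2.1.items

-- ===== PORT B =====
def find_common_mappings_alt (list_a : List String) (list_b : List String) : List (String × String) :=
  -- order = list(dict.fromkeys(list_a))
  let order : List String := PySem.List.dedup list_a
  let in_b : PySem.Set String := PySem.Set.ofList list_b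
  -- result = {x: x for x in order if x in in_b}
  let result0 : PySem.Dict String String :=
    (order.filter (fun x => in_b.contains x)).foldl (fun d x => d.insert x x) PySem.Dict.empty
  -- avail = [y for y in list_b if y not in result]
  let avail0 : List String := list_b.filter (fun y => !result0.contains y)
  let s : PySem.Dict String String × List String :=
    order.foldl
      (fun acc x =>
        if acc.1.contains x then acc
        else
          match acc.2.find? (fun y =>
              PySem.Str.startswith x y || PySem.Str.startswith y x) with
          | none => acc
          | some y => (acc.1.insert x y, acc.2.filter (fun z => z != y)))
      (result0, avail0)
  s.1.items

-- ===== PRECONDITION & SPEC =====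
def Spec_find_common_mappings (list_a : List String) (list_b : List String) (out : List (String × String)) : Prop := out = find_common_mappings_alt list_a list_b
instance (list_a : List String) (list_b : List String) (out : List (String × String)) : Decidable (Spec_find_common_mappings list_a list_b out) := by unfold Spec_find_common_mappings; infer_instance

-- ===== CLAIM (what is proved, stated in full; the proofs are below) =====
def Claim_equal_find_common_mappings : Prop := ∀ (list_a : List String) (list_b : List String), Dom_find_common_mappings list_a list_b → Spec_find_common_mappings list_a list_b (find_common_mappings list_a list_b)

-- ===== LEMMAS AND PROOFS =====

-- A's phase-1 and (reduced) phase-2 step functions, and B's phase-2 step function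
def pvStep1 (lb : List String) (acc : PySem.Dict String String × PySem.Set String)
    (x : String) : PySem.Dict String String × PySem.Set String :=
  if lb.contains x && !(acc.2.contains x) then
    (acc.1.insert x x, PySem.Set.add acc.2 x)
  else acc

def pvStep2 (lb : List String) (acc : PySem.Dict String String × PySem.Set String)
    (x : String) : PySem.Dict String String × PySem.Set String :=
  if acc.1.contains x then acc
  else
    match lb.find? (fun y => has_prefix_match x y && !acc.2.contains y) with
    | none => acc
    | some y => (acc.1.insert x y, PySem.Set.add acc.2 y)

def pvStepB (acc : PySem.Dict String String × List String)
    (x : String) : PySem.Dict String String × List String :=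
  if acc.1.contains x then acc
  else
    match acc.2.find? (fun y => has_prefix_match x y) with
    | none => acc
    | some y => (acc.1.insert x y, acc.2.filter (fun z => z != y))

-- set membership after add
theorem pv_contains_add (s : PySem.Set String) (x z : String) :
    (PySem.Set.add s x).contains z = (s.contains z || z == x) := by
  simp only [PySem.Set.contains, PySem.Set.add, List.contains_eq_mem]
  by_cases hx : x ∈ s <;> by_cases hz : z = x <;> simp [hx, hz]

-- set(list_b) membership agrees with list membership
theorem pv_ofList_contains (lb : List String) (x : String) :
    (PySem.Set.ofList lb).contains x = lb.contains x := by
  simp [PySem.Set.contains, PySem.Set.mem_ofList]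

-- find? over a filtered list
theorem pv_find?_filter (l : List String) (p q : String → Bool) :
    (l.filter p).find? q = l.find? (fun a => q a && p a) := by
  induction l with
  | nil => rfl
  | cons a t ih => by_cases h : p a <;> by_cases h2 : q a <;> simp [h, List.find?, h2, ih]

-- ---- A reduced to the find?-form (reused from the product-table characterisation) ----

-- the inner break-loop over a concatenation: stops in the first part iff it finds an unvisited y there
theorem pvInnerA_append (x : String) (F L : List String)
    (acc : PySem.Dict String String × PySem.Set String) :
    pvInnerA x (F ++ L) acc =
      if (F.find? (fun y => !acc.2.contains y)).isSome then pvInnerA x F acc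
      else pvInnerA x L acc := by
  induction F with
  | nil => simp
  | cons y ys ih =>
      by_cases h : y ∈ acc.2
      · simp [pvInnerA, h, ih]
      · simp [pvInnerA, h, List.find?]

-- k ≥ 1 concatenated copies of the candidate row behave like one copy
theorem pvInnerA_replicate (x : String) (F : List String) (k : Nat) (hk : 1 ≤ k)
    (acc : PySem.Dict String String × PySem.Set String) :
    pvInnerA x (List.replicate k F).flatten acc = pvInnerA x F acc := by
  induction k with
  | zero => omega
  | succ n ih =>
      rcases Nat.eq_or_lt_of_le hk with h1 | h1
      · simp [← h1]
      · have hn : 1 ≤ n := by omega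
        rw [List.replicate_succ, List.flatten_cons, pvInnerA_append, ih hn]
        split <;> rfl

-- the break-loop over the filtered row is the find?-step
theorem pvInnerA_filter (x : String) (lb : List String)
    (acc : PySem.Dict String String × PySem.Set String) :
    pvInnerA x (lb.filter (fun y => has_prefix_match x y)) acc =
      match lb.find? (fun y => has_prefix_match x y && !acc.2.contains y) with
      | none => acc
      | some y => (acc.1.insert x y, PySem.Set.add acc.2 y) := by
  induction lb with
  | nil => simp [pvInnerA]
  | cons y ys ih =>
      by_cases hp : has_prefix_match x y = true
      · by_cases hv : y ∈ acc.2
        · simp [hp, pvInnerA, hv, List.find?, ih]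
        · simp [hp, pvInnerA, hv, List.find?]
      · simp at hp
        simp [hp, List.find?, ih]

-- one row of the product build: folding (a, y) for y ∈ lb appends the filtered row at key a
theorem pv_build_row (a x : String) (lb : List String) (d : PySem.Dict String (List String)) :
    ((lb.map (fun y => (a, y))).foldl
        (fun d p => if has_prefix_match p.1 p.2 then d.modify p.1 [] (· ++ [p.2]) else d)
        d).getD x []
      = d.getD x [] ++ (if a = x then lb.filter (fun y => has_prefix_match a y) else []) := by
  induction lb generalizing d with
  | nil => simp
  | cons y ys ih =>
      by_cases hp : has_prefix_match a y = true
      · rw [List.map_cons, List.foldl_cons]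
        simp only [hp, if_pos]
        rw [ih]
        by_cases hax : a = x
        · subst hax
          simp [PySem.Dict.getD_modify_self, hp]
        · have hxa : ¬ x = a := fun h => hax h.symm
          simp [PySem.Dict.getD_modify, hxa, hax]
      · simp only [Bool.not_eq_true] at hp
        rw [List.map_cons, List.foldl_cons]
        simp only [hp, Bool.false_eq_true, if_neg, not_false_iff]
        rw [ih]
        by_cases hax : a = x
        · subst hax; simp [hp]
        · simp [hax]

-- the full product build: key x holds count(x in la) copies of the filtered row
theorem pv_build_pm (la lb : List String) (x : String) (d : PySem.Dict String (List String)) :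
    ((la.flatMap (fun a => lb.map (fun y => (a, y)))).foldl
        (fun d p => if has_prefix_match p.1 p.2 then d.modify p.1 [] (· ++ [p.2]) else d)
        d).getD x []
      = d.getD x [] ++
        (List.replicate (la.count x) (lb.filter (fun y => has_prefix_match x y))).flatten := by
  induction la generalizing d with
  | nil => simp
  | cons a la' ih =>
      rw [List.flatMap_cons, List.foldl_append, ih, pv_build_row]
      by_cases hax : a = x
      · subst hax
        rw [List.count_cons_self, List.replicate_succ, List.flatten_cons, List.append_assoc]
        simp
      · have hxa : ¬ x = a := fun h => hax h.symm
        simp [hax]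

theorem pv_phase2_step (la lb : List String) (x : String) (hx : x ∈ la)
    (acc : PySem.Dict String String × PySem.Set String) :
    pvInnerA x
        (((la.flatMap (fun a => lb.map (fun y => (a, y)))).foldl
            (fun d p => if has_prefix_match p.1 p.2 then d.modify p.1 [] (· ++ [p.2]) else d)
            PySem.Dict.empty).getD x []) acc
      = match lb.find? (fun y => has_prefix_match x y && !acc.2.contains y) with
        | none => acc
        | some y => (acc.1.insert x y, PySem.Set.add acc.2 y) := by
  rw [pv_build_pm]
  have hc : 1 ≤ la.count x := List.one_le_count_iff.mpr hx
  rw [PySem.Dict.getD_empty, List.nil_append, pvInnerA_replicate x _ _ hc, pvInnerA_filter]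

-- A equals the two find?-form folds over the full list_a
theorem pvA_eq_mid (la lb : List String) :
    find_common_mappings la lb
      = ((la.foldl (pvStep2 lb) (la.foldl (pvStep1 lb)
          (PySem.Dict.empty, PySem.Set.empty))).1).items := by
  unfold find_common_mappings
  dsimp only
  congr 2
  apply PySem.List.foldl_congr_mem
  intro acc x hx
  unfold pvStep2
  by_cases hr : acc.1.contains x = true
  · simp [hr]
  · simp only [Bool.not_eq_true] at hr
    simp only [hr, Bool.false_eq_true, if_neg, not_false_iff]
    rw [pv_phase2_step la lb x hx acc]

-- ---- deduplication: both folds are absorbing, so la may be replaced by dedup la ----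

theorem pv_foldl_filter_of_done {σ : Type} (f : σ → String → σ) (done : σ → String → Prop)
    (h1 : ∀ s x, done s x → f s x = s)
    (h3 : ∀ s x y, done s x → done (f s y) x)
    (x : String) (l : List String) (s : σ) (hd : done s x) :
    l.foldl f s = (l.filter (fun z => z ≠ x)).foldl f s := by
  induction l generalizing s with
  | nil => rfl
  | cons y t ih =>
      by_cases hy : y = x
      · subst hy
        rw [List.foldl_cons, h1 s y hd]
        have : List.filter (fun z => decide (z ≠ y)) (y :: t)
            = List.filter (fun z => decide (z ≠ y)) t := by simp
        rw [this]
        exact ih s hd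
      · simp only [List.foldl_cons, List.filter_cons, ne_eq, hy, not_false_iff, decide_true,
          if_pos, List.foldl_cons]
        exact ih (f s y) (h3 s x y hd)

theorem pv_foldl_add_cons (l : List String) (x : String) (s : List String) (hx : x ∉ l) :
    l.foldl PySem.Set.add (x :: s) = x :: l.foldl PySem.Set.add s := by
  induction l generalizing s with
  | nil => rfl
  | cons y t ih =>
      have hyx : y ≠ x := fun h => hx (h ▸ List.mem_cons_self)
      have hx' : x ∉ t := fun h => hx (List.mem_cons_of_mem _ h)
      simp only [List.foldl_cons, PySem.Set.add]
      by_cases hys : y ∈ s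
      · simp [List.mem_cons, hys, hyx, ih _ hx']
      · have : ¬ y ∈ x :: s := by simp [hys, hyx]
        simp [hys, this, ih _ hx']

theorem pv_dedup_cons (x : String) (xs : List String) :
    PySem.List.dedup (x :: xs) = x :: PySem.List.dedup (xs.filter (fun z => z ≠ x)) := by
  have hdef : ∀ l : List String, PySem.List.dedup l = l.foldl PySem.Set.add [] := by
    intro l
    rw [PySem.List.dedup_eq_ofList, PySem.Set.ofList_eq_foldl]
  rw [hdef, hdef, List.foldl_cons]
  have h0 : PySem.Set.add ([] : List String) x = [x] := rfl
  rw [h0]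
  have hskip := pv_foldl_filter_of_done PySem.Set.add
      (fun s x => PySem.Set.contains s x = true)
      (by intro s x hd
          simp only [PySem.Set.contains, List.contains_eq_mem, decide_eq_true_eq] at hd
          simp [PySem.Set.add, PySem.Set.contains, hd])
      (by intro s x y hd; rw [pv_contains_add, hd]; rfl)
      x xs [x] (by simp [PySem.Set.contains])
  rw [hskip]
  exact pv_foldl_add_cons _ x [] (by simp)

theorem pv_foldl_dedup {σ : Type} (f : σ → String → σ) (done : σ → String → Prop)
    (h1 : ∀ s x, done s x → f s x = s)
    (h2 : ∀ s x, done (f s x) x)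
    (h3 : ∀ s x y, done s x → done (f s y) x)
    (l : List String) (s : σ) :
    l.foldl f s = (PySem.List.dedup l).foldl f s := by
  match l with
  | [] => rfl
  | x :: xs =>
    rw [pv_dedup_cons, List.foldl_cons, List.foldl_cons,
        pv_foldl_filter_of_done f done h1 h3 x xs (f s x) (h2 s x),
        pv_foldl_dedup f done h1 h2 h3 (xs.filter (fun z => z ≠ x)) (f s x)]
termination_by l.length
decreasing_by simp [Nat.lt_succ_of_le (List.length_filter_le _ _)]

-- ---- phase 1: the guarded fold over the (nodup) order is B's comprehension ----

theorem pv_phase1_nodup (lb : List String) (l : List String) (d : PySem.Dict String String)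
    (v : PySem.Set String) (hn : l.Nodup)
    (hfresh : ∀ x ∈ l, d.contains x = false)
    (hcorr : ∀ z, v.contains z = d.contains z) :
    (l.foldl (pvStep1 lb) (d, v)).1
        = (l.filter (fun x => lb.contains x)).foldl (fun d x => d.insert x x) d
      ∧ ∀ z, (l.foldl (pvStep1 lb) (d, v)).2.contains z
            = (l.foldl (pvStep1 lb) (d, v)).1.contains z := by
  induction l generalizing d v with
  | nil => exact ⟨rfl, hcorr⟩
  | cons x t ih =>
      have hdx : d.contains x = false := hfresh x List.mem_cons_self
      have hvx : v.contains x = false := (hcorr x).trans hdx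
      rw [List.foldl_cons, List.filter_cons]
      by_cases hb : lb.contains x = true
      · have hc : (lb.contains x && !(v.contains x)) = true := by rw [hb, hvx]; rfl
        have hstep : pvStep1 lb (d, v) x = (d.insert x x, PySem.Set.add v x) := by
          simp only [pvStep1, hc]; rfl
        rw [hstep, if_pos hb, List.foldl_cons]
        apply ih
        · exact hn.of_cons
        · intro x' hx'
          rw [PySem.Dict.contains_insert]
          have : x' ≠ x := fun h => (List.nodup_cons.mp hn).1 (h ▸ hx')
          simp [this, hfresh x' (List.mem_cons_of_mem _ hx')]
        · intro z
          rw [pv_contains_add, PySem.Dict.contains_insert, hcorr z, Bool.or_comm]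
      · have hb' : lb.contains x = false := by simpa using hb
        have hc : (lb.contains x && !(v.contains x)) = false := by rw [hb']; rfl
        have hstep : pvStep1 lb (d, v) x = (d, v) := by
          simp only [pvStep1, hc]; rfl
        rw [hstep, if_neg hb]
        exact ih d v hn.of_cons (fun x' hx' => hfresh x' (List.mem_cons_of_mem _ hx')) hcorr

-- ---- phase 2: state correspondence (visited set ↔ remaining pool) ----

theorem pv_phase2_corr (lb : List String) (l : List String)
    (r : PySem.Dict String String) (v : PySem.Set String) :
    (l.foldl pvStepB (r, lb.filter (fun y => !v.contains y))).1
      = (l.foldl (pvStep2 lb) (r, v)).1 := by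
  induction l generalizing r v with
  | nil => rfl
  | cons x t ih =>
      rw [List.foldl_cons, List.foldl_cons]
      by_cases hr : r.contains x = true
      · have h1 : pvStepB (r, lb.filter (fun y => !v.contains y)) x
            = (r, lb.filter (fun y => !v.contains y)) := by
          simp only [pvStepB]; rw [if_pos hr]
        have h2 : pvStep2 lb (r, v) x = (r, v) := by
          simp only [pvStep2]; rw [if_pos hr]
        rw [h1, h2]; exact ih r v
      · have hfind : (lb.filter (fun y => !v.contains y)).find? (fun y => has_prefix_match x y)
            = lb.find? (fun y => has_prefix_match x y && !v.contains y) :=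
          pv_find?_filter lb _ _
        cases hf : lb.find? (fun y => has_prefix_match x y && !v.contains y) with
        | none =>
            have h1 : pvStepB (r, lb.filter (fun y => !v.contains y)) x
                = (r, lb.filter (fun y => !v.contains y)) := by
              simp only [pvStepB]; rw [if_neg hr, hfind, hf]
            have h2 : pvStep2 lb (r, v) x = (r, v) := by
              simp only [pvStep2]; rw [if_neg hr, hf]
            rw [h1, h2]; exact ih r v
        | some y =>
            have hfil : (lb.filter (fun y' => !v.contains y')).filter (fun z => z != y)
                = lb.filter (fun z => !(PySem.Set.add v y).contains z) := by
              rw [List.filter_filter]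
              apply List.filter_congr
              intro z _
              rw [pv_contains_add]
              cases hvz : v.contains z <;> cases hzy : z == y <;> simp_all [bne]
            have h1 : pvStepB (r, lb.filter (fun y' => !v.contains y')) x
                = (r.insert x y, lb.filter (fun z => !(PySem.Set.add v y).contains z)) := by
              simp only [pvStepB]; rw [if_neg hr, hfind, hf]
              exact congrArg (Prod.mk (r.insert x y)) hfil
            have h2 : pvStep2 lb (r, v) x = (r.insert x y, PySem.Set.add v y) := by
              simp only [pvStep2]; rw [if_neg hr, hf]
            rw [h1, h2]
            exact ih (r.insert x y) (PySem.Set.add v y)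

-- phase-1 step: absorption properties for the dedup lemma
def pvDone1 (lb : List String) (s : PySem.Dict String String × PySem.Set String)
    (x : String) : Prop := s.2.contains x = true ∨ lb.contains x = false

theorem pvDone1_skip (lb : List String) (s : PySem.Dict String String × PySem.Set String)
    (x : String) (hd : pvDone1 lb s x) : pvStep1 lb s x = s := by
  have hc : (lb.contains x && !(s.2.contains x)) = false := by
    rcases hd with h | h
    · rw [h]; simp
    · rw [h]; rfl
  simp only [pvStep1, hc]; rfl

theorem pvDone1_post (lb : List String) (s : PySem.Dict String String × PySem.Set String)
    (x : String) : pvDone1 lb (pvStep1 lb s x) x := by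
  by_cases hb : lb.contains x = true
  · by_cases hv : s.2.contains x = true
    · rw [pvDone1_skip lb s x (Or.inl hv)]; exact Or.inl hv
    · have hv' : s.2.contains x = false := by simpa using hv
      have hc : (lb.contains x && !(s.2.contains x)) = true := by rw [hb, hv']; rfl
      have hs : pvStep1 lb s x = (s.1.insert x x, PySem.Set.add s.2 x) := by
        simp only [pvStep1, hc]; rfl
      left; rw [hs]
      show (PySem.Set.add s.2 x).contains x = true
      rw [pv_contains_add]; simp
  · exact Or.inr (by simpa using hb)

theorem pvDone1_mono (lb : List String) (s : PySem.Dict String String × PySem.Set String)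
    (x y : String) (hd : pvDone1 lb s x) : pvDone1 lb (pvStep1 lb s y) x := by
  rcases hd with h | h
  · by_cases hc : (lb.contains y && !(s.2.contains y)) = true
    · have hs : pvStep1 lb s y = (s.1.insert y y, PySem.Set.add s.2 y) := by
        simp only [pvStep1, hc]; rfl
      left; rw [hs]
      show (PySem.Set.add s.2 y).contains x = true
      rw [pv_contains_add, h]; rfl
    · have hc' : (lb.contains y && !(s.2.contains y)) = false := by simpa using hc
      rw [show pvStep1 lb s y = s by simp only [pvStep1, hc']; rfl]
      exact Or.inl h
  · exact Or.inr h

-- phase-2 step: absorption properties for the dedup lemma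
def pvDone2 (lb : List String) (s : PySem.Dict String String × PySem.Set String)
    (x : String) : Prop :=
  s.1.contains x = true ∨ lb.find? (fun y => has_prefix_match x y && !s.2.contains y) = none

theorem pvDone2_skip (lb : List String) (s : PySem.Dict String String × PySem.Set String)
    (x : String) (hd : pvDone2 lb s x) : pvStep2 lb s x = s := by
  rcases hd with h | h
  · simp only [pvStep2]; rw [if_pos h]
  · by_cases hr : s.1.contains x = true
    · simp only [pvStep2]; rw [if_pos hr]
    · simp only [pvStep2]; rw [if_neg hr, h]

theorem pvDone2_post (lb : List String) (s : PySem.Dict String String × PySem.Set String)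
    (x : String) : pvDone2 lb (pvStep2 lb s x) x := by
  by_cases hr : s.1.contains x = true
  · rw [pvDone2_skip lb s x (Or.inl hr)]; exact Or.inl hr
  · cases hf : lb.find? (fun y => has_prefix_match x y && !s.2.contains y) with
    | none =>
        rw [pvDone2_skip lb s x (Or.inr hf)]; exact Or.inr hf
    | some y =>
        have hs : pvStep2 lb s x = (s.1.insert x y, PySem.Set.add s.2 y) := by
          simp only [pvStep2]; rw [if_neg hr, hf]
        left; rw [hs]
        show (s.1.insert x y).contains x = true
        rw [PySem.Dict.contains_insert]; simp

theorem pvDone2_mono (lb : List String) (s : PySem.Dict String String × PySem.Set String)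
    (x y : String) (hd : pvDone2 lb s x) : pvDone2 lb (pvStep2 lb s y) x := by
  by_cases hr : s.1.contains y = true
  · rw [pvDone2_skip lb s y (Or.inl hr)]; exact hd
  · cases hf : lb.find? (fun z => has_prefix_match y z && !s.2.contains z) with
    | none => rw [pvDone2_skip lb s y (Or.inr hf)]; exact hd
    | some w =>
        have hs : pvStep2 lb s y = (s.1.insert y w, PySem.Set.add s.2 w) := by
          simp only [pvStep2]; rw [if_neg hr, hf]
        rw [hs]
        rcases hd with h | h
        · left
          show (s.1.insert y w).contains x = true
          rw [PySem.Dict.contains_insert, h]; simp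
        · right
          rw [List.find?_eq_none] at h ⊢
          intro z hz
          by_cases hvz : s.2.contains z = true
          · have hadd : (PySem.Set.add s.2 w).contains z = true := by
              rw [pv_contains_add, hvz]; rfl
            intro hcon
            have h2 := (Bool.and_eq_true_iff.mp hcon).2
            rw [hadd] at h2
            exact absurd h2 (by simp)
          · have := h z hz
            have hvz' : s.2.contains z = false := by simpa using hvz
            rw [hvz'] at this
            intro hcon
            apply this
            simpa using (Bool.and_eq_true_iff.mp hcon).1

-- ===== VERDICT (by name: the statement is the Claim_ definition above) =====
theorem find_common_mappings_spec : Claim_equal_find_common_mappings := by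
  intro la lb _
  unfold Spec_find_common_mappings
  rw [pvA_eq_mid]
  -- replace both folds over la by folds over the deduplicated order
  rw [pv_foldl_dedup (pvStep1 lb) (pvDone1 lb) (pvDone1_skip lb) (pvDone1_post lb)
        (pvDone1_mono lb) la (PySem.Dict.empty, PySem.Set.empty),
      pv_foldl_dedup (pvStep2 lb) (pvDone2 lb) (pvDone2_skip lb) (pvDone2_post lb)
        (pvDone2_mono lb) la _]
  -- characterise phase 1 over the (nodup) order
  obtain ⟨hP1, hC1⟩ := pv_phase1_nodup lb (PySem.List.dedup la) PySem.Dict.empty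
      PySem.Set.empty (PySem.List.nodup_dedup la)
      (fun x _ => by simp) (fun z => by simp [PySem.Set.contains, PySem.Set.empty])
  unfold find_common_mappings_alt
  dsimp only
  have hfilter : (PySem.List.dedup la).filter (fun x => (PySem.Set.ofList lb).contains x)
      = (PySem.List.dedup la).filter (fun x => lb.contains x) :=
    List.filter_congr (fun x _ => by rw [pv_ofList_contains])
  rw [hfilter, ← hP1]
  set s1 := (PySem.List.dedup la).foldl (pvStep1 lb) (PySem.Dict.empty, PySem.Set.empty) with hs1
  have havail : lb.filter (fun y => !s1.1.contains y) = lb.filter (fun y => !s1.2.contains y) :=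
    List.filter_congr (fun y _ => by rw [hC1])
  rw [havail,
      show (fun (acc : PySem.Dict String String × List String) (x : String) =>
          if acc.1.contains x then acc
          else
            match acc.2.find? (fun y =>
                PySem.Str.startswith x y || PySem.Str.startswith y x) with
            | none => acc
            | some y => (acc.1.insert x y, acc.2.filter (fun z => z != y))) = pvStepB from rfl,
      pv_phase2_corr lb (PySem.List.dedup la) s1.1 s1.2]
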